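-- pv_equiv track=rewrite | github.com/jakjank/KursyUWr_UP | WDP_Python/lista 10/10.4-dwie_funkcje.py | suma_podzbiorow
-- ===== SOURCE A (Python) =====
-- def suma_podzbiorow(L):
--     def sumuj(z):
--         wynik = 0
--         for e in z:
--             wynik = wynik+e
--         return(wynik)
--
--     if len(L) == 1:
--         return [L[0]]
--
--     tmp = [sumuj(L[0:i]) for i in range(1, len(L)+1)] + ([L[0]+e for e in L[1:]]) + (suma_podzbiorow(L[1:]))
--
--     return tmp
-- ===== SOURCE B (Python) =====
-- def suma_podzbiorow(L):
--     # Iterative: one pass per suffix with a running accumulator (no re-summation, no recursion).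
--     out = []
--     n = len(L)
--     for k in range(n - 1):
--         acc = 0
--         for e in L[k:]:
--             acc += e
--             out.append(acc)
--         for e in L[k + 1:]:
--             out.append(L[k] + e)
--     out.append(L[-1])
--     return out
-- ===== Notes on version B (the rewrite author's own statement) =====
-- stated objective: faster
-- what changed: Replaces A's recursion over suffixes with an iterative two-level loop, and replaces A's repeated re-summation of every prefix (sumuj over L[0:i] for each i) with a single running accumulator per suffix.
import Mathlib
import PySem

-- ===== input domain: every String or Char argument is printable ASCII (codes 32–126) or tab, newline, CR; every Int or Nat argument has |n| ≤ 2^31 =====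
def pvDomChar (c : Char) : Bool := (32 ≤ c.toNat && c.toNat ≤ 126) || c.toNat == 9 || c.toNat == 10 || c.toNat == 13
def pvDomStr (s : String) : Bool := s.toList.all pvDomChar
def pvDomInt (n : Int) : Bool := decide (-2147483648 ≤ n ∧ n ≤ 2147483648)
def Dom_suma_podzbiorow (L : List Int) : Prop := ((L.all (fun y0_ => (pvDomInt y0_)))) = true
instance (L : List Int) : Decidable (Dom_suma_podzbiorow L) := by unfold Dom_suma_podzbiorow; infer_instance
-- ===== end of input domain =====

-- B replaces A's O(n^3) recursion with repeated prefix re-summation by an iterative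
-- two-level loop with a running accumulator (O(n^2), proportional to the output size).

-- ===== PORT A =====
-- inner helper 'sumuj': a for-loop summing the list
def sumuj (z : List Int) : Int := z.foldl (fun wynik e => wynik + e) 0

def suma_podzbiorow : List Int → List Int
  | [] => []   -- Python A never returns here (infinite recursion); excluded by Pre_
  | [x] => [x]
  | x :: xs =>
      ((PySem.List.pyRange 1 (((x :: xs).length : Int) + 1) 1).map
          (fun i => sumuj (PySem.List.slice (x :: xs) (some 0) (some i))))
        ++ xs.map (fun e => x + e)
        ++ suma_podzbiorow xs

-- ===== PORT B =====
-- inner accumulator loop state: (acc, out); 'acc += e; out.append(acc)'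
def prefStep (p : Int × List Int) (e : Int) : Int × List Int := (p.1 + e, p.2 ++ [p.1 + e])

-- body of the 'for k in range(n-1)' loop of Source B
def bstep (L : List Int) (out : List Int) (k : Nat) : List Int :=
  let acc_out := (L.drop k).foldl prefStep (0, out)   -- L[k:] (exact: slice_from_natCast)
  acc_out.2 ++ (L.drop (k + 1)).map (fun e => L.getD k 0 + e)

def suma_podzbiorow_alt (L : List Int) : List Int :=
  ((List.range (L.length - 1)).foldl (bstep L) []) ++ [L.getD (L.length - 1) 0]
  -- Python's last-element access = L.getD (L.length-1) 0 on the nonempty lists Pre_ admits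

-- ===== PRECONDITION & SPEC =====
-- Pre_ excludes only the empty list, on which A never returns (infinite recursion,
-- RecursionError) and B raises IndexError on its last-element access.
def Pre_suma_podzbiorow (L : List Int) : Prop := L ≠ []
instance (L : List Int) : Decidable (Pre_suma_podzbiorow L) := by
  unfold Pre_suma_podzbiorow; infer_instance

def pvWitness_suma_podzbiorow : List Int := [1, 2, 3]

def Spec_suma_podzbiorow (L : List Int) (out : List Int) : Prop := out = suma_podzbiorow_alt L
instance (L : List Int) (out : List Int) : Decidable (Spec_suma_podzbiorow L out) := by
  unfold Spec_suma_podzbiorow; infer_instance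

-- ===== CLAIM (what is proved, stated in full; the proofs are below) =====
def Claim_equal_suma_podzbiorow : Prop :=
  ∀ (L : List Int), Dom_suma_podzbiorow L → Pre_suma_podzbiorow L →
    Spec_suma_podzbiorow L (suma_podzbiorow L)

-- ===== LEMMAS AND PROOFS =====

-- specification helper: prefix sums starting from accumulator a
def prefAcc (a : Int) : List Int → List Int
  | [] => []
  | e :: l => (a + e) :: prefAcc (a + e) l

theorem foldl_prefStep (l : List Int) : ∀ (a : Int) (out : List Int),
    (l.foldl prefStep (a, out)).2 = out ++ prefAcc a l := by
  induction l with
  | nil => intro a out; simp [prefAcc]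
  | cons e l ih => intro a out; simp [prefStep, prefAcc, ih]

theorem map_take_foldl (L : List Int) : ∀ (a : Int),
    (List.range L.length).map (fun k => (L.take (k + 1)).foldl (fun w e => w + e) a)
      = prefAcc a L := by
  induction L with
  | nil => intro a; simp [prefAcc]
  | cons x t ih =>
      intro a
      rw [List.length_cons, List.range_succ_eq_map, List.map_cons, List.map_map]
      simp only [Function.comp_def, Nat.succ_eq_add_one, List.take_succ_cons, List.foldl_cons]
      exact congrArg (fun r => (a + x) :: r) (ih (a + x))

theorem a_prefix_block (L : List Int) :
    (PySem.List.pyRange 1 ((L.length : Int) + 1) 1).map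
        (fun i => sumuj (PySem.List.slice L (some 0) (some i)))
      = prefAcc 0 L := by
  rw [PySem.List.pyRange_one]
  have h1 : ((L.length : Int) + 1 - 1).toNat = L.length := by omega
  rw [h1, List.map_map]
  rw [← map_take_foldl L 0]
  apply List.map_congr_left
  intro k hk
  simp only [Function.comp_def, sumuj]
  have : (1 : Int) + (k : Int) = ((k + 1 : Nat) : Int) := by push_cast; ring
  rw [this]
  rw [PySem.List.slice_zero_start, PySem.List.slice_to_natCast]

theorem bstep_shift (x : Int) (ys : List Int) (out : List Int) (k : Nat) :
    bstep (x :: ys) out (k + 1) = bstep ys out k := by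
  simp [bstep]

theorem main_lemma : ∀ (L : List Int), L ≠ [] → ∀ (out : List Int),
    ((List.range (L.length - 1)).foldl (bstep L) out) ++ [L.getD (L.length - 1) 0]
      = out ++ suma_podzbiorow L := by
  intro L
  induction L with
  | nil => intro h; exact absurd rfl h
  | cons x xs ih =>
      intro _ out
      cases xs with
      | nil => simp [suma_podzbiorow]
      | cons y t =>
          have hlen : (x :: y :: t).length - 1 = t.length + 1 := by simp
          rw [hlen, List.range_succ_eq_map, List.foldl_cons, List.foldl_map]
          have hfun : (fun o k => bstep (x :: y :: t) o (Nat.succ k)) = bstep (y :: t) := by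
            funext o k
            exact bstep_shift x (y :: t) o k
          rw [hfun]
          have hget : (x :: y :: t).getD (t.length + 1) 0 = (y :: t).getD t.length 0 :=
            List.getD_cons_succ
          have hrec := ih (by simp) (bstep (x :: y :: t) out 0)
          have hlen2 : (y :: t).length - 1 = t.length := by simp
          rw [hlen2] at hrec
          rw [hget, hrec]
          -- evaluate bstep at 0 and A's unfolding
          have hA : suma_podzbiorow (x :: y :: t)
              = ((PySem.List.pyRange 1 (((x :: y :: t).length : Int) + 1) 1).map
                    (fun i => sumuj (PySem.List.slice (x :: y :: t) (some 0) (some i))))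
                  ++ (y :: t).map (fun e => x + e) ++ suma_podzbiorow (y :: t) := rfl
          have hB : bstep (x :: y :: t) out 0
              = (out ++ prefAcc 0 (x :: y :: t)) ++ (y :: t).map (fun e => x + e) := by
            rw [show bstep (x :: y :: t) out 0
                  = ((x :: y :: t).foldl prefStep (0, out)).2
                      ++ (y :: t).map (fun e => x + e) from rfl,
                foldl_prefStep]
          rw [hA, a_prefix_block, hB]
          simp [List.append_assoc]

-- ===== VERDICT (by name: the statement is the Claim_ definition above) =====
theorem suma_podzbiorow_spec : Claim_equal_suma_podzbiorow := by
  intro L _ hpre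
  unfold Spec_suma_podzbiorow suma_podzbiorow_alt
  exact (main_lemma L hpre []).symm
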